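-- pv_equiv track=rewrite | github.com/josephtingiris/vscode-keyboard-navigation | bin/keybindings-duplicate.py | normalize_key_for_compare
-- ===== SOURCE A (Python) =====
-- CORPUS_MODIFIERS = [
--     "alt",
--     "ctrl",
--     "ctrl+alt",
--     "shift+alt",
--     "ctrl+alt+meta",
--     "ctrl+shift+alt",
--     "shift+alt+meta",
--     "ctrl+shift+alt+meta",
-- ]
--
-- def normalize_modifier(modifier: str) -> str:
--     """Normalize one modifier token."""
--     return modifier.strip().lower()
--
-- def normalize_key_for_compare(key_value: str) -> str:
--     """Normalize key text for duplicate comparisons."""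
--     key_value = key_value.strip().lower()
--     if not key_value:
--         return ""
--
--     chord_parts = [part for part in key_value.split() if part.strip()]
--     normalized_chords: list[str] = []
--
--     for chord in chord_parts:
--         key_bits = [bit.strip() for bit in chord.split("+") if bit.strip()]
--         if not key_bits:
--             continue
--         literal = key_bits[-1]
--         modifiers = [normalize_modifier(bit) for bit in key_bits[:-1]]
--         unique_modifiers = list(dict.fromkeys(modifiers))
--
--         corpus_modifier_tokens = list(
--             dict.fromkeys(
--                 token
--                 for modifier in CORPUS_MODIFIERS
--                 for token in modifier.split("+")
--                 if token
--             )
--         )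
--         ordered_modifiers: list[str] = []
--         for token in corpus_modifier_tokens:
--             if token in unique_modifiers:
--                 ordered_modifiers.append(token)
--         unknown_modifiers = sorted([
--             token for token in unique_modifiers if token not in corpus_modifier_tokens
--         ])
--         ordered_modifiers.extend(unknown_modifiers)
--
--         if ordered_modifiers:
--             normalized_chords.append("+".join(ordered_modifiers + [literal]))
--         else:
--             normalized_chords.append(literal)
--
--     return " ".join(normalized_chords)
-- ===== SOURCE B (Python) =====
-- PRIORITY = {"alt": 0, "ctrl": 1, "shift": 2, "meta": 3}
--
-- def normalize_modifier(modifier: str) -> str: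
--     """Normalize one modifier token."""
--     return modifier.strip().lower()
--
-- def normalize_key_for_compare(key_value: str) -> str:
--     """Normalize key text for duplicate comparisons."""
--     chords = []
--     for chord in key_value.strip().lower().split():
--         bits = [bit.strip() for bit in chord.split("+") if bit.strip()]
--         if not bits:
--             continue
--         mods = dict.fromkeys(normalize_modifier(bit) for bit in bits[:-1])
--         ordered = sorted(mods, key=lambda m: (PRIORITY.get(m, 4), m))
--         chords.append("+".join(ordered + [bits[-1]]))
--     return " ".join(chords)
-- ===== Notes on version B (the rewrite author's own statement) =====
-- stated objective: idiomatic
-- what changed: Per chord, A rebuilds the corpus token list, runs a membership pass over it plus a separate filter-and-sort of unknown modifiers; B precomputes a priority map once and orders the deduplicated modifiers with a single stable sort keyed by (priority, name).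
import Mathlib
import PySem

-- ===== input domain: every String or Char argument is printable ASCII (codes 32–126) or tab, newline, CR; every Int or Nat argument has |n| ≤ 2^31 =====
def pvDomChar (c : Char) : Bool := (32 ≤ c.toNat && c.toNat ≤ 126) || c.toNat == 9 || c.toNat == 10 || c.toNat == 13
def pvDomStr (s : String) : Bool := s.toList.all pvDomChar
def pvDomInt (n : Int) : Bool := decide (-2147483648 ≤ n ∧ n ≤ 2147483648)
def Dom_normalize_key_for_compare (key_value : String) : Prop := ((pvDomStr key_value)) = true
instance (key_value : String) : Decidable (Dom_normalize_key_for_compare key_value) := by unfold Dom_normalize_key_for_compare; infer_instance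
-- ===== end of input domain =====

-- B replaces A's per-chord corpus-token rebuild plus two filter passes and a separate
-- sort of the unknowns by one stable sort under a precomputed priority key (idiomatic).

-- ===== PORT A =====
def CORPUS_MODIFIERS : List String :=
  ["alt", "ctrl", "ctrl+alt", "shift+alt", "ctrl+alt+meta",
   "ctrl+shift+alt", "shift+alt+meta", "ctrl+shift+alt+meta"]

def normalize_modifier (modifier : String) : String :=
  PySem.Str.lower (PySem.Str.strip modifier)

def normalize_key_for_compare (key_value : String) : String :=
  let kv := PySem.Str.lower (PySem.Str.strip key_value)
  if kv = "" then ""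
  else
    let chord_parts := (PySem.Str.split₀ kv).filter (fun part => PySem.Str.strip part ≠ "")
    let normalized_chords := chord_parts.foldl (fun acc chord =>
      -- chord.split("+"): sep "+" ≠ "" so split? is always some; getD is exact here
      let key_bits := (((PySem.Str.split? chord "+").getD []).filter
          (fun bit => PySem.Str.strip bit ≠ "")).map (fun bit => PySem.Str.strip bit)
      match key_bits.getLast? with
      | none => acc
      | some literal =>
        let modifiers := key_bits.dropLast.map (fun bit => normalize_modifier bit)
        let unique_modifiers := PySem.List.dedup modifiers
        let corpus_modifier_tokens := PySem.List.dedup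
          ((CORPUS_MODIFIERS.flatMap (fun m => (PySem.Str.split? m "+").getD [])).filter
            (fun t => t ≠ ""))
        let ordered_modifiers := corpus_modifier_tokens.foldl
          (fun om token => if token ∈ unique_modifiers then om ++ [token] else om) []
        let unknown_modifiers := PySem.List.sorted
          (unique_modifiers.filter (fun t => decide (t ∉ corpus_modifier_tokens))) (fun t => t)
        let ordered_modifiers := ordered_modifiers ++ unknown_modifiers
        if ordered_modifiers ≠ [] then
          acc ++ [PySem.Str.join "+" (ordered_modifiers ++ [literal])]
        else
          acc ++ [literal]) []
    PySem.Str.join " " normalized_chords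

-- ===== PORT B =====
def PRIORITY : PySem.Dict String Int :=
  PySem.Dict.ofList [("alt", 0), ("ctrl", 1), ("shift", 2), ("meta", 3)]

def normalize_key_for_compare_alt (key_value : String) : String :=
  let chords := (PySem.Str.split₀ (PySem.Str.lower (PySem.Str.strip key_value))).foldl
    (fun acc chord =>
      -- chord.split("+"): sep "+" ≠ "" so split? is always some; getD is exact here
      let bits := (((PySem.Str.split? chord "+").getD []).filter
          (fun bit => PySem.Str.strip bit ≠ "")).map (fun bit => PySem.Str.strip bit)
      match bits.getLast? with
      | none => acc
      | some literal =>
        let mods := PySem.List.dedup (bits.dropLast.map (fun bit => normalize_modifier bit))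
        let ordered := PySem.List.sorted2 mods (fun m => PRIORITY.getD m 4) (fun m => m)
        acc ++ [PySem.Str.join "+" (ordered ++ [literal])]) []
  PySem.Str.join " " chords

-- ===== PRECONDITION & SPEC =====
def Spec_normalize_key_for_compare (key_value : String) (out : String) : Prop := out = normalize_key_for_compare_alt key_value
instance (key_value : String) (out : String) : Decidable (Spec_normalize_key_for_compare key_value out) := by unfold Spec_normalize_key_for_compare; infer_instance

-- ===== CLAIM (what is proved, stated in full; the proofs are below) =====
def Claim_equal_normalize_key_for_compare : Prop := ∀ (key_value : String), Dom_normalize_key_for_compare key_value → Spec_normalize_key_for_compare key_value (normalize_key_for_compare key_value)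

-- ===== LEMMAS AND PROOFS =====

-- A's per-chord corpus token list is just the four modifier tokens.
lemma corpus_tokens_eq :
    PySem.List.dedup
      ((CORPUS_MODIFIERS.flatMap (fun m => (PySem.Str.split? m "+").getD [])).filter
        (fun t => t ≠ "")) = ["alt", "ctrl", "shift", "meta"] := by
  decide

lemma PRIORITY_eq :
    PRIORITY = PySem.Dict.mk [("alt", 0), ("ctrl", 1), ("shift", 2), ("meta", 3)] := rfl

lemma prio_of_not_mem (m : String) (h : m ∉ (["alt", "ctrl", "shift", "meta"] : List String)) :
    PRIORITY.getD m 4 = 4 := by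
  simp only [List.mem_cons, not_or] at h
  obtain ⟨h1, h2, h3, h4, -⟩ := h
  simp [PRIORITY_eq, PySem.Dict.getD, Ne.symm h1, Ne.symm h2, Ne.symm h3, Ne.symm h4,
    PySem.Dict.get?]

lemma prio_lt_four (m : String) (h : m ∈ (["alt", "ctrl", "shift", "meta"] : List String)) :
    PRIORITY.getD m 4 < 4 := by
  simp only [List.mem_cons, List.not_mem_nil, or_false] at h
  rcases h with rfl | rfl | rfl | rfl <;> decide

-- sorted2 under keys (k1 m, m) is sorted under the corresponding lexicographic key.
lemma sorted2_eq_sorted_lex (xs : List String) (k1 : String → Int) :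
    PySem.List.sorted2 xs k1 (fun m => m) =
      PySem.List.sorted xs (fun m => toLex (k1 m, m)) := by
  have hfun : (fun (a b : String) =>
        decide (k1 a < k1 b) || (!decide (k1 b < k1 a) && decide (a < b)))
      = (fun (a b : String) => decide (toLex (k1 a, a) < toLex (k1 b, b))) := by
    funext a b
    rcases lt_trichotomy (k1 a) (k1 b) with h | h | h
    · simp [h, Prod.Lex.toLex_lt_toLex, not_lt_of_gt h]
    · simp [h, Prod.Lex.toLex_lt_toLex]
    · simp [not_lt_of_gt h, Prod.Lex.toLex_lt_toLex, ne_of_gt h]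
      exact fun hle => absurd h (not_lt_of_ge hle)
  show xs.foldl (fun acc x => PySem.List.insertBy
      (fun a b => decide (k1 a < k1 b) || (!decide (k1 b < k1 a) && decide (a < b))) x acc) [] =
    xs.foldl (fun acc x => PySem.List.insertBy
      (fun a b => decide (toLex (k1 a, a) < toLex (k1 b, b))) x acc) []
  rw [hfun]

-- A's corpus pass is a filter of the corpus list.
lemma foldl_append_mem (l um acc : List String) :
    l.foldl (fun om token => if token ∈ um then om ++ [token] else om) acc
      = acc ++ l.filter (fun t => decide (t ∈ um)) := by
  induction l generalizing acc with
  | nil => simp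
  | cons x xs ih =>
      by_cases hx : x ∈ um <;> simp [hx, ih]

-- The core ordering fact: A's corpus pass + sorted unknowns = B's single keyed sort.
lemma order_eq (um : List String) (h : um.Nodup) :
    (["alt", "ctrl", "shift", "meta"] : List String).foldl
        (fun om token => if token ∈ um then om ++ [token] else om) []
      ++ PySem.List.sorted
          (um.filter (fun t => decide (t ∉ (["alt", "ctrl", "shift", "meta"] : List String))))
          (fun t => t)
    = PySem.List.sorted2 um (fun m => PRIORITY.getD m 4) (fun m => m) := by
  rw [sorted2_eq_sorted_lex, foldl_append_mem, List.nil_append]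
  have hCnd : (["alt", "ctrl", "shift", "meta"] : List String).Nodup := by decide
  refine (PySem.List.sorted_eq_of_perm_of_pairwise_lt um _ _ ?_ ?_).symm
  · have h1 : ((["alt", "ctrl", "shift", "meta"] : List String).filter
        (fun t => decide (t ∈ um))).Perm
        (um.filter (fun t => decide (t ∈ (["alt", "ctrl", "shift", "meta"] : List String)))) := by
      rw [List.perm_ext_iff_of_nodup (hCnd.filter _) (h.filter _)]
      intro a; simp only [List.mem_filter, decide_eq_true_eq]; tauto
    have h2 := PySem.List.sorted_perm
      (um.filter (fun t => decide (t ∉ (["alt", "ctrl", "shift", "meta"] : List String))))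
      (fun t => t) false
    have h3 : um.filter (fun t => decide (t ∉ (["alt", "ctrl", "shift", "meta"] : List String)))
        = um.filter
            (fun t => !(decide (t ∈ (["alt", "ctrl", "shift", "meta"] : List String)))) := by
      simp
    refine (h1.append h2).trans ?_
    rw [h3]
    exact List.filter_append_perm _ um
  · rw [List.pairwise_append]
    refine ⟨?_, ?_, ?_⟩
    · refine List.Pairwise.sublist List.filter_sublist ?_
      decide
    · have hnd : (PySem.List.sorted
          (um.filter (fun t => decide (t ∉ (["alt", "ctrl", "shift", "meta"] : List String))))
          (fun t => t)).Nodup :=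
        (PySem.List.sorted_perm _ _ _).symm.nodup (h.filter _)
      have hle := PySem.List.sorted_pairwise
        (um.filter (fun t => decide (t ∉ (["alt", "ctrl", "shift", "meta"] : List String))))
        (fun t => t)
      have hlt := (hle.and hnd).imp (fun hab => lt_of_le_of_ne hab.1 hab.2)
      refine hlt.imp_of_mem ?_
      intro a b ha hb hab
      rw [PySem.List.mem_sorted] at ha hb
      rw [List.mem_filter] at ha hb
      have hpa : PRIORITY.getD a 4 = 4 := prio_of_not_mem a (by simpa using ha.2)
      have hpb : PRIORITY.getD b 4 = 4 := prio_of_not_mem b (by simpa using hb.2)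
      rw [Prod.Lex.toLex_lt_toLex]
      right; exact ⟨by rw [hpa, hpb], hab⟩
    · intro a ha b hb
      rw [List.mem_filter] at ha
      rw [PySem.List.mem_sorted, List.mem_filter] at hb
      have hpa := prio_lt_four a ha.1
      have hpb : PRIORITY.getD b 4 = 4 := prio_of_not_mem b (by simpa using hb.2)
      rw [Prod.Lex.toLex_lt_toLex]
      left; omega

-- Every word produced by split₀ is nonempty and whitespace-free.
lemma split₀_go_spec (s cur : List Char) (acc : List (List Char))
    (hcur : ∀ c ∈ cur, PySem.Chars.isspace c = false)
    (hacc : ∀ w ∈ acc, w ≠ [] ∧ ∀ c ∈ w, PySem.Chars.isspace c = false) :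
    ∀ w ∈ PySem.Chars.split₀.go s cur acc,
      w ≠ [] ∧ ∀ c ∈ w, PySem.Chars.isspace c = false := by
  induction s generalizing cur acc with
  | nil =>
      intro w hw
      unfold PySem.Chars.split₀.go at hw
      by_cases hc : cur.isEmpty
      · rw [if_pos hc, List.mem_reverse] at hw
        exact hacc w hw
      · rw [if_neg hc, List.mem_reverse] at hw
        rcases List.mem_cons.mp hw with rfl | hw
        · refine ⟨by simpa using (List.isEmpty_eq_false_iff.mp (by simpa using hc)), ?_⟩
          intro c hc'; exact hcur c (List.mem_reverse.mp hc')
        · exact hacc w hw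
  | cons c rest ih =>
      intro w hw
      unfold PySem.Chars.split₀.go at hw
      by_cases hs : PySem.Chars.isspace c
      · rw [if_pos hs] at hw
        by_cases hc : cur.isEmpty
        · rw [if_pos hc] at hw
          exact ih [] acc (by simp) hacc w hw
        · rw [if_neg hc] at hw
          refine ih [] _ (by simp) ?_ w hw
          intro v hv
          rcases List.mem_cons.mp hv with rfl | hv
          · refine ⟨by simpa using (List.isEmpty_eq_false_iff.mp (by simpa using hc)), ?_⟩
            intro d hd; exact hcur d (List.mem_reverse.mp hd)
          · exact hacc v hv
      · rw [if_neg hs] at hw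
        refine ih (c :: cur) acc ?_ hacc w hw
        intro d hd
        rcases List.mem_cons.mp hd with rfl | hd
        · simpa using hs
        · exact hcur d hd

lemma dropWhile_eq_self_of_all_false (m : List Char)
    (hm : ∀ c ∈ m, PySem.Chars.isspace c = false) :
    List.dropWhile PySem.Chars.isspace m = m := by
  rw [List.dropWhile_eq_self_iff]
  intro h0
  simp [hm _ (List.getElem_mem _)]

lemma split₀_words (s : String) :
    ∀ w ∈ PySem.Str.split₀ s, PySem.Str.strip w ≠ "" := by
  intro w hw
  rcases List.mem_map.mp hw with ⟨l, hl, rfl⟩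
  have hspec := split₀_go_spec s.toList [] [] (by simp) (by simp) l hl
  have hl' : ∀ c ∈ l, PySem.Chars.isspace c = false := hspec.2
  have hstrip : PySem.Chars.strip l = l := by
    unfold PySem.Chars.strip PySem.Chars.lstrip PySem.Chars.rstrip
    rw [dropWhile_eq_self_of_all_false l hl',
      dropWhile_eq_self_of_all_false l.reverse (fun c hc => hl' c (List.mem_reverse.mp hc)),
      List.reverse_reverse]
  intro hempty
  apply hspec.1
  have h2 : (PySem.Str.strip (String.ofList l)).toList = [] := by rw [hempty]; rfl
  rw [PySem.Str.toList_strip, String.toList_ofList, hstrip] at h2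
  exact h2

lemma join_singleton_str (x : String) : PySem.Str.join "+" [x] = x := by
  unfold PySem.Str.join
  rw [List.map_cons, List.map_nil, PySem.Chars.join_singleton, String.ofList_toList]

-- The two per-chord loop bodies agree.
lemma step_eq (acc : List String) (chord : String) :
    (let key_bits := (((PySem.Str.split? chord "+").getD []).filter
        (fun bit => PySem.Str.strip bit ≠ "")).map (fun bit => PySem.Str.strip bit)
     match key_bits.getLast? with
     | none => acc
     | some literal =>
       let modifiers := key_bits.dropLast.map (fun bit => normalize_modifier bit)
       let unique_modifiers := PySem.List.dedup modifiers
       let corpus_modifier_tokens := PySem.List.dedup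
         ((CORPUS_MODIFIERS.flatMap (fun m => (PySem.Str.split? m "+").getD [])).filter
           (fun t => t ≠ ""))
       let ordered_modifiers := corpus_modifier_tokens.foldl
         (fun om token => if token ∈ unique_modifiers then om ++ [token] else om) []
       let unknown_modifiers := PySem.List.sorted
         (unique_modifiers.filter (fun t => decide (t ∉ corpus_modifier_tokens))) (fun t => t)
       let ordered_modifiers := ordered_modifiers ++ unknown_modifiers
       if ordered_modifiers ≠ [] then
         acc ++ [PySem.Str.join "+" (ordered_modifiers ++ [literal])]
       else
         acc ++ [literal])
    = (let bits := (((PySem.Str.split? chord "+").getD []).filter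
          (fun bit => PySem.Str.strip bit ≠ "")).map (fun bit => PySem.Str.strip bit)
       match bits.getLast? with
       | none => acc
       | some literal =>
         let mods := PySem.List.dedup (bits.dropLast.map (fun bit => normalize_modifier bit))
         let ordered := PySem.List.sorted2 mods (fun m => PRIORITY.getD m 4) (fun m => m)
         acc ++ [PySem.Str.join "+" (ordered ++ [literal])]) := by
  dsimp only
  rw [corpus_tokens_eq]
  cases hlast : (((PySem.Str.split? chord "+").getD []).filter
      (fun bit => PySem.Str.strip bit ≠ "")).map (fun bit => PySem.Str.strip bit) |>.getLast? with
  | none => rfl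
  | some literal =>
      dsimp only
      rw [← order_eq _ (PySem.List.nodup_dedup _)]
      by_cases hord :
        ((["alt", "ctrl", "shift", "meta"] : List String).foldl
          (fun om token => if token ∈ PySem.List.dedup
              (((((PySem.Str.split? chord "+").getD []).filter
                (fun bit => PySem.Str.strip bit ≠ "")).map
                  (fun bit => PySem.Str.strip bit)).dropLast.map
                    (fun bit => normalize_modifier bit))
            then om ++ [token] else om) []
        ++ PySem.List.sorted
          ((PySem.List.dedup
              (((((PySem.Str.split? chord "+").getD []).filter
                (fun bit => PySem.Str.strip bit ≠ "")).map
                  (fun bit => PySem.Str.strip bit)).dropLast.map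
                    (fun bit => normalize_modifier bit))).filter
            (fun t => decide (t ∉ (["alt", "ctrl", "shift", "meta"] : List String))))
          (fun t => t)) = []
      · rw [hord, if_neg (by simp), List.nil_append, join_singleton_str]
      · rw [if_pos hord]

-- ===== VERDICT (by name: the statement is the Claim_ definition above) =====
theorem normalize_key_for_compare_spec : Claim_equal_normalize_key_for_compare := by
  intro key_value _
  unfold Spec_normalize_key_for_compare normalize_key_for_compare normalize_key_for_compare_alt
  dsimp only
  by_cases hkv : PySem.Str.lower (PySem.Str.strip key_value) = ""
  · rw [if_pos hkv, hkv]
    rfl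
  · rw [if_neg hkv]
    have hfilter : (PySem.Str.split₀ (PySem.Str.lower (PySem.Str.strip key_value))).filter
        (fun part => decide (PySem.Str.strip part ≠ "")) =
        PySem.Str.split₀ (PySem.Str.lower (PySem.Str.strip key_value)) :=
      List.filter_eq_self.mpr (fun w hw => by simpa using split₀_words _ w hw)
    rw [hfilter]
    have hstep := funext (fun acc => funext (fun chord => step_eq acc chord))
    rw [hstep]
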